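-- pv_equiv track=rewrite | github.com/YinAqu/plugins | albert/GoogleEnToZh.py | subOneline
-- ===== SOURCE A (Python) =====
-- lineLen = 52
--
-- def isASCChar(ch):
--     asc = ord(ch)
--     if asc <= 177:
--         return True
--     return False
--
-- def subOneline(txt):
--     index = 0
--     normalizeLen = 0
--     lineTxt = ''
--     txtLen = len(txt)
--     while(normalizeLen <= lineLen and index < txtLen):
--         ch = txt[index]
--         if isASCChar(ch):
--             normalizeLen += 1
--         else:
--             normalizeLen += 2
--         index += 1
--         lineTxt += ch
--     return lineTxt
-- ===== SOURCE B (Python) =====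
-- lineLen = 52
--
-- def isASCChar(ch):
--     asc = ord(ch)
--     if asc <= 177:
--         return True
--     return False
--
-- def subOneline(txt):
--     widths = [1 if ord(ch) <= 177 else 2 for ch in txt]
--     cut = 0
--     prefix = 0
--     for w in widths:
--         if prefix > lineLen:
--             break
--         cut += 1
--         prefix += w
--     return txt[:cut]
-- ===== Notes on version B (the rewrite author's own statement) =====
-- stated objective: alternative
-- what changed: B replaces A's while-loop that concatenates characters one at a time onto a growing string with a widths list, a fold that counts how many characters fit, and a single slice of the original string.
import Mathlib
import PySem

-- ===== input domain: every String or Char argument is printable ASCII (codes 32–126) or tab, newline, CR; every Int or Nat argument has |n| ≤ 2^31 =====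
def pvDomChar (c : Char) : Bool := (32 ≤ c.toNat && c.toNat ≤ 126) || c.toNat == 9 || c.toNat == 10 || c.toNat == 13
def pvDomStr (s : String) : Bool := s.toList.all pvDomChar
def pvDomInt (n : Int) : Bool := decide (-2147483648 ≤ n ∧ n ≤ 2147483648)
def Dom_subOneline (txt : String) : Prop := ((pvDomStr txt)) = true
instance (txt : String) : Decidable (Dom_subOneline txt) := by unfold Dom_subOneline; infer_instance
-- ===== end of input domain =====

-- B differs from A only in decomposition (slice the original string instead of building it char by char); same return value on all inputs.

-- ===== PORT A =====
def isASCChar (ch : Char) : Bool :=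
  if (ch.toNat : Int) ≤ 177 then true else false

-- the while loop of A: state = (remaining chars = txt[index:], normalizeLen, lineTxt)
def subOnelineGo (rem : List Char) (normalizeLen : Int) (lineTxt : List Char) : List Char :=
  match rem with
  | [] => lineTxt
  | ch :: rest =>
      if normalizeLen ≤ 52 then
        subOnelineGo rest (normalizeLen + (if isASCChar ch then 1 else 2)) (lineTxt ++ [ch])
      else lineTxt

def subOneline (txt : String) : String :=
  String.mk (subOnelineGo txt.toList 0 [])

-- ===== PORT B =====
-- the for loop of B over the widths list: state = (prefix, cut)
def cutGo (ws : List Int) (pfx : Int) (cut : Nat) : Nat :=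
  match ws with
  | [] => cut
  | w :: rest => if pfx > 52 then cut else cutGo rest (pfx + w) (cut + 1)

def subOneline_alt (txt : String) : String :=
  let widths := txt.toList.map (fun ch => if (ch.toNat : Int) ≤ 177 then (1 : Int) else 2)
  String.mk (txt.toList.take (cutGo widths 0 0))

-- ===== PRECONDITION & SPEC =====
def Spec_subOneline (txt : String) (out : String) : Prop := out = subOneline_alt txt
instance (txt : String) (out : String) : Decidable (Spec_subOneline txt out) := by unfold Spec_subOneline; infer_instance

-- ===== CLAIM (what is proved, stated in full; the proofs are below) =====
def Claim_equal_subOneline : Prop := ∀ (txt : String), Dom_subOneline txt → Spec_subOneline txt (subOneline txt)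

-- ===== LEMMAS AND PROOFS =====

-- proof-side characterisation: the number of characters A consumes starting at count n
def cChars (l : List Char) (n : Int) : Nat :=
  match l with
  | [] => 0
  | ch :: rest => if n > 52 then 0 else 1 + cChars rest (n + (if isASCChar ch then 1 else 2))

theorem subOnelineGo_eq (l : List Char) (n : Int) (acc : List Char) :
    subOnelineGo l n acc = acc ++ l.take (cChars l n) := by
  induction l generalizing n acc with
  | nil => simp [subOnelineGo, cChars]
  | cons ch rest ih =>
      by_cases h : n > 52
      · have h' : ¬ n ≤ 52 := by omega
        simp [subOnelineGo, cChars, h, h']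
      · have h' : n ≤ 52 := by omega
        simp [subOnelineGo, cChars, h, h', ih]
        rw [Nat.add_comm 1, List.take_succ_cons]

theorem cutGo_eq (l : List Char) (n : Int) (k : Nat) :
    cutGo (l.map (fun ch => if (ch.toNat : Int) ≤ 177 then (1 : Int) else 2)) n k
      = k + cChars l n := by
  induction l generalizing n k with
  | nil => simp [cutGo, cChars]
  | cons ch rest ih =>
      by_cases h : n > 52
      · simp [cutGo, cChars, h]
      · have he : (if (ch.toNat : Int) ≤ 177 then (1 : Int) else 2)
            = (if isASCChar ch then (1 : Int) else 2) := by
          simp [isASCChar]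
        simp only [List.map, cutGo, cChars, if_neg h, he, ih]
        omega

-- ===== VERDICT (by name: the statement is the Claim_ definition above) =====
theorem subOneline_spec : Claim_equal_subOneline := by
  intro txt _
  unfold Spec_subOneline subOneline subOneline_alt
  simp only [subOnelineGo_eq, cutGo_eq, List.nil_append, Nat.zero_add]
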